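-- pv_equiv track=rewrite | github.com/shkipan/pitcoin | pitcoin/utxo_set.py | utxo_select_inputs
-- ===== SOURCE A (Python) =====
-- from operator import itemgetter
--
-- def utxo_select_inputs(out_set, fee, amount):
--     res = []
--     bal = 0
--     for i in out_set:
--         bal += i['amount']
--         if (i['amount'] > amount + fee):
--             res.append(i)
--             return (res)
--     if (bal < amount + fee):
--         return res
--     outs = sorted(out_set, key=itemgetter('amount'), reverse=True)
--     i = 0
--     bal = 0
--     while bal < amount + fee:
--         bal += outs[i]['amount']
--         res.append(outs[i])
--         i += 1
--     return res
-- ===== SOURCE B (Python) =====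
-- def utxo_select_inputs(out_set, fee, amount):
--     target = amount + fee
--     # a single output strictly larger than the target wins outright (first in order)
--     for o in out_set:
--         if o['amount'] > target:
--             return [o]
--     # not enough funds overall
--     if sum(o['amount'] for o in out_set) < target:
--         return []
--     # greedy selection WITHOUT sorting: repeatedly extract the first maximal
--     # remaining output until the running balance reaches the target
--     res = []
--     bal = 0
--     remaining = list(out_set)
--     while bal < target:
--         j = max(range(len(remaining)), key=lambda i: remaining[i]['amount'])
--         o = remaining.pop(j)
--         res.append(o)
--         bal += o['amount']
--     return res
-- ===== Notes on version B (the rewrite author's own statement) =====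
-- stated objective: alternative
-- what changed: B removes the sort entirely: instead of sorting descending and walking a prefix, it repeatedly extracts the first maximal remaining output (selection) until the running balance reaches the target; the single-large-output scan and the total-sum guard stay as separate plain passes.
import Mathlib
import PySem

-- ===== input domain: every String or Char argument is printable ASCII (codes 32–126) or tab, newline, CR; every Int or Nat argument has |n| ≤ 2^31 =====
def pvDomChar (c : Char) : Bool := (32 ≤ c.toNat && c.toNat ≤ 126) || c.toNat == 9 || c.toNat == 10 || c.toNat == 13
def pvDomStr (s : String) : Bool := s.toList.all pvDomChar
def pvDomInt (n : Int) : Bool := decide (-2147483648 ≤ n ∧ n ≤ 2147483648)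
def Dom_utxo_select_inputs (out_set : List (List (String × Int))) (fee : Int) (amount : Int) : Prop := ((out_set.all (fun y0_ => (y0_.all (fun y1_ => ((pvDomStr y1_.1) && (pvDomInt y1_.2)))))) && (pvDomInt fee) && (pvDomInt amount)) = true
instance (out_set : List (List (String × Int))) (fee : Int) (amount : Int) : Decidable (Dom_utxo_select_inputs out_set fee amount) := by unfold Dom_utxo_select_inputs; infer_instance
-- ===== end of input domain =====

-- B removes the sort entirely: it repeatedly extracts the first maximal remaining output
-- until the target is reached (selection instead of sort-then-prefix); the first-match scan
-- and the total-sum guard stay as separate plain passes (objective: alternative, not faster).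

-- ===== PORT A =====

-- first-match association-list lookup of the 'amount' key (exact for d['amount'])
def uLookup (d : List (String × Int)) : Option Int :=
  match d with
  | [] => none
  | (k, v) :: rest => if k = "amount" then some v else uLookup rest

-- i['amount'] (Pre_ guarantees the key is present, so the default is never used)
def uAmt (d : List (String × Int)) : Int := (uLookup d).getD 0

-- A's first for-loop: early-return Sum.inl [i], otherwise the accumulated bal
def uA_loop1 (xs : List (List (String × Int))) (bal target : Int) :
    Sum (List (List (String × Int))) Int :=
  match xs with
  | [] => .inr bal
  | i :: rest =>
      if uAmt i > target then .inl [i]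
      else uA_loop1 rest (bal + uAmt i) target

-- A's while-loop: while bal < target take outs[i], bal += its amount
def uA_greedy (outs : List (List (String × Int))) (bal target : Int) :
    List (List (String × Int)) :=
  match outs with
  | [] => []
  | o :: rest => if bal < target then o :: uA_greedy rest (bal + uAmt o) target else []

def utxo_select_inputs (out_set : List (List (String × Int))) (fee : Int) (amount : Int) :
    List (List (String × Int)) :=
  match uA_loop1 out_set 0 (amount + fee) with
  | .inl res => res
  | .inr bal =>
      if bal < amount + fee then []
      else
        let outs := PySem.List.sorted out_set (fun d => uAmt d) true
        uA_greedy outs 0 (amount + fee)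

-- ===== PORT B =====

-- phase 1: first output with amount strictly above target
def uB_first (xs : List (List (String × Int))) (target : Int) :
    Option (List (String × Int)) :=
  match xs with
  | [] => none
  | o :: rest => if uAmt o > target then some o else uB_first rest target

-- phase 2: sum of all amounts
def uB_sum (xs : List (List (String × Int))) : Int :=
  match xs with
  | [] => 0
  | o :: rest => uAmt o + uB_sum rest

-- max(range(len(l)), key=lambda i: l[i]['amount']): index of the FIRST maximal amount
def uB_maxIdx (l : List (List (String × Int))) : Nat :=
  match l with
  | [] => 0
  | [_] => 0
  | x :: y :: t =>
      let j := uB_maxIdx (y :: t)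
      if uAmt ((y :: t).getD j []) > uAmt x then j + 1 else 0

-- needed by uB_sel's termination: the extracted index is in range
theorem uB_maxIdx_lt (l : List (List (String × Int))) (h : l ≠ []) :
    uB_maxIdx l < l.length := by
  induction l with
  | nil => simp at h
  | cons x t ih =>
    cases t with
    | nil => simp [uB_maxIdx]
    | cons y s =>
      simp only [uB_maxIdx]
      have := ih (by simp)
      split <;> simp_all

-- phase 3: the while-loop — pop the first maximal output until bal reaches target
def uB_sel (remaining : List (List (String × Int))) (bal target : Int) :
    List (List (String × Int)) :=
  if bal < target then
    match remaining with
    | [] => []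
    | x :: t =>
        let j := uB_maxIdx (x :: t)
        let o := (x :: t).getD j []
        o :: uB_sel ((x :: t).eraseIdx j) (bal + uAmt o) target
  else []
  termination_by remaining.length
  decreasing_by
    have hlt : uB_maxIdx (x :: t) < (x :: t).length := uB_maxIdx_lt (x :: t) (by simp)
    simp only [List.length_eraseIdx, if_pos hlt]
    omega

def utxo_select_inputs_alt (out_set : List (List (String × Int))) (fee : Int) (amount : Int) :
    List (List (String × Int)) :=
  let target := amount + fee
  match uB_first out_set target with
  | some o => [o]
  | none =>
      if uB_sum out_set < target then []
      else uB_sel out_set 0 target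

-- ===== PRECONDITION & SPEC =====
-- Pre_ excludes exactly the inputs where A raises KeyError: a dict without an 'amount' key is
-- scanned, i.e. it is not preceded by a dict whose amount already exceeds amount+fee (early return).
def Pre_utxo_select_inputs (out_set : List (List (String × Int))) (fee : Int) (amount : Int) : Prop :=
  ∀ j < out_set.length, ((out_set.getD j []).lookup "amount").isSome = true ∨
    ∃ i < j, ((out_set.getD i []).lookup "amount").isSome = true ∧
      ((out_set.getD i []).lookup "amount").getD 0 > amount + fee

instance (out_set : List (List (String × Int))) (fee : Int) (amount : Int) : Decidable (Pre_utxo_select_inputs out_set fee amount) := by unfold Pre_utxo_select_inputs; infer_instance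

def pvWitness_utxo_select_inputs : (List (List (String × Int))) × Int × Int :=
  ([[("amount", 5)], [("amount", 2)]], 1, 4)

def Spec_utxo_select_inputs (out_set : List (List (String × Int))) (fee : Int) (amount : Int) (out : List (List (String × Int))) : Prop := out = utxo_select_inputs_alt out_set fee amount
instance (out_set : List (List (String × Int))) (fee : Int) (amount : Int) (out : List (List (String × Int))) : Decidable (Spec_utxo_select_inputs out_set fee amount out) := by unfold Spec_utxo_select_inputs; infer_instance

-- ===== CLAIM (what is proved, stated in full; the proofs are below) =====
def Claim_equal_utxo_select_inputs : Prop := ∀ (out_set : List (List (String × Int))) (fee : Int) (amount : Int), Dom_utxo_select_inputs out_set fee amount → Pre_utxo_select_inputs out_set fee amount → Spec_utxo_select_inputs out_set fee amount (utxo_select_inputs out_set fee amount)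

-- ===== LEMMAS AND PROOFS =====

-- A's first pass = B's first-match scan, and on no match bal accumulates the total sum
theorem uA_loop1_eq (xs : List (List (String × Int))) (bal target : Int) :
    uA_loop1 xs bal target =
      match uB_first xs target with
      | some o => .inl [o]
      | none => .inr (bal + uB_sum xs) := by
  induction xs generalizing bal with
  | nil => simp [uA_loop1, uB_first, uB_sum]
  | cons o rest ih =>
    simp only [uA_loop1, uB_first, uB_sum]
    by_cases h : uAmt o > target
    · simp [h]
    · simp only [if_neg h, ih]
      cases uB_first rest target <;> simp <;> ring

-- stable insert of x AFTER the maximal strict prefix of larger amounts: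
-- x goes before the first y with amount y ≤ amount x
def uInsLE (x : List (String × Int)) (ys : List (List (String × Int))) :
    List (List (String × Int)) :=
  match ys with
  | [] => [x]
  | y :: t => if uAmt y ≤ uAmt x then x :: y :: t else y :: uInsLE x t

-- one-step commutation of uInsLE with the reverse-insertion step of PySem's stable sort
theorem uInsLE_insertBy (x y : List (String × Int)) (acc : List (List (String × Int))) :
    PySem.List.insertBy (fun a b => decide (uAmt b < uAmt a)) y (uInsLE x acc) =
      uInsLE x (PySem.List.insertBy (fun a b => decide (uAmt b < uAmt a)) y acc) := by
  induction acc with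
  | nil =>
    simp only [uInsLE, PySem.List.insertBy]
    by_cases h : uAmt y ≤ uAmt x <;> by_cases h' : uAmt x < uAmt y <;>
      simp [uInsLE, PySem.List.insertBy, h, h'] <;> omega
  -- (the (h, h') case split feeds the if-conditions of both insertion rules)
  | cons z zs ih =>
    simp only [uInsLE, PySem.List.insertBy]
    by_cases hzx : uAmt z ≤ uAmt x
    · by_cases hxy : uAmt x < uAmt y
      · have hzy : uAmt z < uAmt y := by omega
        simp [PySem.List.insertBy, uInsLE, hzx, hxy, hzy,
          show ¬ uAmt y ≤ uAmt x by omega]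
      · by_cases hzy : uAmt z < uAmt y <;>
          simp [PySem.List.insertBy, uInsLE, hzx, hxy, hzy,
            show uAmt y ≤ uAmt x by omega]
    · by_cases hzy : uAmt z < uAmt y
      · simp [PySem.List.insertBy, uInsLE, hzx, hzy, show ¬ uAmt y ≤ uAmt x by omega]
      · simp [PySem.List.insertBy, uInsLE, hzx, hzy, ih]
  -- (omega closes the arithmetic side conditions on the Int amounts)

-- uInsLE commutes with the whole fold of reverse insertions
theorem uInsLE_foldl (l : List (List (String × Int))) (x : List (String × Int))
    (acc : List (List (String × Int))) :
    List.foldl (fun acc x => PySem.List.insertBy (fun a b => decide (uAmt b < uAmt a)) x acc)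
        (uInsLE x acc) l =
      uInsLE x (List.foldl
        (fun acc x => PySem.List.insertBy (fun a b => decide (uAmt b < uAmt a)) x acc) acc l) := by
  induction l generalizing acc with
  | nil => rfl
  | cons y t ih => simp only [List.foldl, uInsLE_insertBy, ih]

-- sorted(x::l, reverse=True) = insert x stably into sorted(l, reverse=True)
theorem sortedRev_cons (x : List (String × Int)) (l : List (List (String × Int))) :
    PySem.List.sorted (x :: l) (fun d => uAmt d) true =
      uInsLE x (PySem.List.sorted l (fun d => uAmt d) true) := by
  rw [PySem.List.sorted_rev_eq_foldl_insertBy, PySem.List.sorted_rev_eq_foldl_insertBy]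
  show List.foldl _ (PySem.List.insertBy _ x []) l = _
  have : PySem.List.insertBy (fun a b => decide (uAmt b < uAmt a)) x
      ([] : List (List (String × Int))) = uInsLE x [] := rfl
  rw [this, uInsLE_foldl]

-- the element at the first-max index dominates every member
theorem uB_maxIdx_max (l : List (List (String × Int))) :
    ∀ y ∈ l, uAmt y ≤ uAmt (l.getD (uB_maxIdx l) []) := by
  induction l with
  | nil => simp
  | cons x t ih =>
    cases t with
    | nil => simp [uB_maxIdx]
    | cons z s =>
      intro y hy
      simp only [uB_maxIdx]
      split
      · next h =>
        simp only [List.getD_cons_succ]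
        rcases List.mem_cons.mp hy with rfl | hy'
        · omega
        · exact ih y hy'
      · next h =>
        simp only [List.getD_cons_zero]
        rcases List.mem_cons.mp hy with rfl | hy'
        · exact le_refl _
        · have := ih y hy'
          omega

-- THE KEY FACT: the head of the stable descending sort is the first maximal element,
-- and its tail is the stable descending sort of the list with that element removed
theorem sortedRev_sel (l : List (List (String × Int))) (h : l ≠ []) :
    PySem.List.sorted l (fun d => uAmt d) true =
      l.getD (uB_maxIdx l) [] ::
        PySem.List.sorted (l.eraseIdx (uB_maxIdx l)) (fun d => uAmt d) true := by
  induction l with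
  | nil => simp at h
  | cons x t ih =>
    cases ht : t with
    | nil => simp [uB_maxIdx, PySem.List.sorted, PySem.List.insertBy]
    | cons z s =>
      rw [← ht]
      have htne : t ≠ [] := by simp [ht]
      by_cases hm : uAmt (t.getD (uB_maxIdx t) []) > uAmt x
      · have hidx : uB_maxIdx (x :: t) = uB_maxIdx t + 1 := by
          subst ht; simp only [uB_maxIdx]; rw [if_pos hm]
        rw [hidx, List.getD_cons_succ, List.eraseIdx_cons_succ]
        rw [sortedRev_cons, ih htne, sortedRev_cons]
        simp only [uInsLE]
        rw [if_neg (by omega)]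
      · have hidx : uB_maxIdx (x :: t) = 0 := by
          subst ht; simp only [uB_maxIdx]; rw [if_neg hm]
        rw [hidx, List.getD_cons_zero, List.eraseIdx_cons_zero]
        rw [sortedRev_cons]
        cases hs : PySem.List.sorted t (fun d => uAmt d) true with
        | nil => simp [uInsLE]
        | cons m r =>
          have hmem : m ∈ t := by
            have : m ∈ PySem.List.sorted t (fun d => uAmt d) true := by simp [hs]
            rwa [PySem.List.mem_sorted] at this
          have : uAmt m ≤ uAmt x := le_trans (uB_maxIdx_max t m hmem) (by omega)
          simp [uInsLE, this]

-- B's selection loop = A's while-loop over the descending-sorted list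
theorem uB_sel_eq (n : Nat) (xs : List (List (String × Int))) (bal target : Int)
    (hn : xs.length ≤ n) :
    uB_sel xs bal target = uA_greedy (PySem.List.sorted xs (fun d => uAmt d) true) bal target := by
  induction n generalizing xs bal with
  | zero =>
    have : xs = [] := List.length_eq_zero_iff.mp (Nat.le_zero.mp hn)
    subst this
    rw [uB_sel.eq_def]
    simp [uA_greedy, PySem.List.sorted]
  | succ n ih =>
    rw [uB_sel.eq_def]
    by_cases hb : bal < target
    · rw [if_pos hb]
      cases xs with
      | nil => simp [uA_greedy, PySem.List.sorted]
      | cons a t =>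
        show (a :: t).getD (uB_maxIdx (a :: t)) [] ::
            uB_sel ((a :: t).eraseIdx (uB_maxIdx (a :: t)))
              (bal + uAmt ((a :: t).getD (uB_maxIdx (a :: t)) [])) target =
          uA_greedy (PySem.List.sorted (a :: t) (fun d => uAmt d) true) bal target
        have hne : (a :: t) ≠ ([] : List (List (String × Int))) := by simp
        rw [sortedRev_sel _ hne]
        simp only [uA_greedy, if_pos hb]
        have hlt := uB_maxIdx_lt _ hne
        have hlen : ((a :: t).eraseIdx (uB_maxIdx (a :: t))).length ≤ n := by
          rw [List.length_eraseIdx]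
          rw [if_pos hlt]
          simp only [List.length_cons] at hn ⊢
          omega
        rw [ih _ _ hlen]
    · rw [if_neg hb]
      cases PySem.List.sorted xs (fun d => uAmt d) true <;> simp [uA_greedy, hb]

-- ===== VERDICT (by name: the statement is the Claim_ definition above) =====
theorem utxo_select_inputs_spec : Claim_equal_utxo_select_inputs := by
  intro out_set fee amount _ _
  unfold Spec_utxo_select_inputs utxo_select_inputs utxo_select_inputs_alt
  rw [uA_loop1_eq]
  cases hf : uB_first out_set (amount + fee) with
  | some o => simp [hf]
  | none =>
    simp only [zero_add, hf]
    by_cases hb : uB_sum out_set < amount + fee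
    · simp [hb]
    · simp only [if_neg hb]
      exact (uB_sel_eq out_set.length out_set 0 (amount + fee) le_rfl).symm
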